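-- pv_equiv track=rewrite | github.com/rimrim/rqbv | bv.py | mod_poly
-- ===== SOURCE A (Python) =====
-- def mod_poly(poly, d):
--     """divide polynomial by x^d + 1"""
--     original_len = len(poly)
--     temp = [poly[x] for x in range(0, d)]
--     for i in range(d, original_len):
--         power = i // d
--         index = i % d
--         if power == 1:
--             plus = -1 * poly[i]
--         else:
--             plus = ((-1) ** power) * poly[i]
--         temp[index] += plus
--     # print repr(temp)
--     return temp
-- ===== SOURCE B (Python) =====
-- def mod_poly(poly, d):
--     """divide polynomial by x^d + 1"""
--     temp = [poly[x] for x in range(0, d)]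
--     sign = 1
--     for base in range(d, len(poly), d):
--         sign = -sign
--         for j, c in enumerate(poly[base:base + d]):
--             temp[j] += sign * c
--     return temp
-- ===== Notes on version B (the rewrite author's own statement) =====
-- stated objective: alternative
-- what changed: B walks the tail coefficients in consecutive size-d blocks (slice + enumerate) with a sign that flips once per block, instead of A's flat pass that computes i//d, i%d and (-1)**power for every single coefficient.
-- outside the precondition, e.g. on mod_poly([], 0): A returns [], B raises ValueError
import Mathlib
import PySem

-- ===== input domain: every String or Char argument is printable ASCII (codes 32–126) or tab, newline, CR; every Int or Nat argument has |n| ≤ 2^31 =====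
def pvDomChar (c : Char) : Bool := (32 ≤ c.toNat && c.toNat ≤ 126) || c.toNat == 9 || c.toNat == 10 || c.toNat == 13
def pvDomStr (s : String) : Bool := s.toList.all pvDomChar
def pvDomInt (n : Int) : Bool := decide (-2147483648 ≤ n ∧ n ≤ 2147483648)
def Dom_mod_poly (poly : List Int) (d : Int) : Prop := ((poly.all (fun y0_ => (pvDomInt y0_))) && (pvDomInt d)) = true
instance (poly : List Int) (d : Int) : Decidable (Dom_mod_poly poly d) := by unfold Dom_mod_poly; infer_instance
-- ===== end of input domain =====

-- B reduces modulo x^d+1 block-by-block (slice + enumerate, sign flipped once per block)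
-- instead of A's flat pass computing i//d, i%d and (-1)**power per coefficient.

-- ===== PORT A =====
def mod_poly (poly : List Int) (d : Int) : List Int :=
  let original_len : Int := poly.length
  let temp := (PySem.List.pyRange 0 d 1).map (fun x => PySem.List.pyGetD poly x 0)
  (PySem.List.pyRange d original_len 1).foldl (fun temp i =>
    let power := PySem.Int.floordiv i d
    let index := PySem.Int.mod i d
    let plus := if power = 1 then (-1) * PySem.List.pyGetD poly i 0
                else ((-1 : Int) ^ power.toNat) * PySem.List.pyGetD poly i 0
    temp.set index.toNat (temp.getD index.toNat 0 + plus)) temp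

-- ===== PORT B =====
def mod_poly_alt (poly : List Int) (d : Int) : List Int :=
  let temp := (PySem.List.pyRange 0 d 1).map (fun x => PySem.List.pyGetD poly x 0)
  ((PySem.List.pyRange d (poly.length : Int) d).foldl (fun (st : List Int × Int) base =>
      let sign := -st.2
      let temp := (PySem.List.enumerate (PySem.List.slice poly (some base) (some (base + d)))).foldl
        (fun t jc => t.set jc.1.toNat (t.getD jc.1.toNat 0 + sign * jc.2)) st.1
      (temp, sign)) (temp, 1)).1

-- ===== PRECONDITION & SPEC =====
-- Pre_ excludes d ≤ 0 and len(poly) < d, where A raises (IndexError / ZeroDivisionError) — except the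
-- single degenerate input (poly = [], d = 0), on which A returns [] while B's range(d, len, d) itself
-- raises ValueError (zero step), so that input is excluded too.
def Pre_mod_poly (poly : List Int) (d : Int) : Prop := 0 < d ∧ d ≤ (poly.length : Int)
instance (poly : List Int) (d : Int) : Decidable (Pre_mod_poly poly d) := by unfold Pre_mod_poly; infer_instance
def pvWitness_mod_poly : List Int × Int := ([1, 2, 3, 4, 5], 2)
def Spec_mod_poly (poly : List Int) (d : Int) (out : List Int) : Prop := out = mod_poly_alt poly d
instance (poly : List Int) (d : Int) (out : List Int) : Decidable (Spec_mod_poly poly d out) := by unfold Spec_mod_poly; infer_instance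

-- ===== CLAIM (what is proved, stated in full; the proofs are below) =====
def Claim_equal_mod_poly : Prop := ∀ (poly : List Int) (d : Int), Dom_mod_poly poly d → Pre_mod_poly poly d → Spec_mod_poly poly d (mod_poly poly d)

-- ===== LEMMAS AND PROOFS =====



-- step-d range lemmas
lemma pyRange_step_nil (a b d : Int) (hd : 0 < d) (h : b ≤ a) :
    PySem.List.pyRange a b d = [] := by
  rw [PySem.List.pyRange_of_pos a b hd]
  simp [show ¬ a < b by omega]

lemma ediv_shift (r d : Int) (hd : 0 < d) : (r + d) / d = r / d + 1 := by
  have := Int.add_mul_ediv_left r 1 (show d ≠ 0 by omega)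
  simpa using this

lemma pyRange_step_cons (a b d : Int) (hd : 0 < d) (h : a < b) :
    PySem.List.pyRange a b d = a :: PySem.List.pyRange (a + d) b d := by
  rw [PySem.List.pyRange_of_pos a b hd, PySem.List.pyRange_of_pos (a+d) b hd]
  have h1 : b - a + d - 1 = (b - a - 1) + d := by ring
  have h2 : (b - a + d - 1) / d = (b - a - 1) / d + 1 := by
    rw [h1]; exact ediv_shift _ _ hd
  have h3 : 0 ≤ (b - a - 1) / d := Int.ediv_nonneg (by omega) (by omega)
  have h4 : ((b - a + d - 1) / d).toNat = ((b - a - 1) / d).toNat + 1 := by omega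
  by_cases hb : a + d < b
  · have h5 : b - (a + d) + d - 1 = b - a - 1 := by ring
    simp only [if_pos h, if_pos hb, h4, h5, List.range_succ_eq_map, List.map_cons, List.map_map]
    refine List.cons_eq_cons.mpr ⟨by simp, ?_⟩
    apply List.map_congr_left; intro k _; simp [Function.comp]; ring
  · have h6 : (b - a - 1) / d = 0 := Int.ediv_eq_zero_of_lt (by omega) (by omega)
    simp only [if_pos h, if_neg hb, h4, h6]
    norm_num

def Af (poly : List Int) (d : Int) (temp : List Int) (i : Int) : List Int :=
  let power := PySem.Int.floordiv i d
  let index := PySem.Int.mod i d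
  let plus := if power = 1 then (-1) * PySem.List.pyGetD poly i 0
              else ((-1 : Int) ^ power.toNat) * PySem.List.pyGetD poly i 0
  temp.set index.toNat (temp.getD index.toNat 0 + plus)

def Bg (poly : List Int) (d : Int) (st : List Int × Int) (base : Int) : List Int × Int :=
  let sign := -st.2
  let temp := (PySem.List.enumerate (PySem.List.slice poly (some base) (some (base + d)))).foldl
    (fun t jc => t.set jc.1.toNat (t.getD jc.1.toNat 0 + sign * jc.2)) st.1
  (temp, sign)

lemma neg_pow_pred (k : Nat) (hk : 1 ≤ k) : -(-1 : Int) ^ (k - 1) = (-1) ^ k := by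
  obtain ⟨k', rfl⟩ := Nat.exists_eq_add_of_le hk
  simp [pow_succ, pow_add]

lemma block_lemma (poly : List Int) (d : Int) (hd : 0 < d) (k : Nat) (hk : 1 ≤ k)
    (hlt : d * k < (poly.length : Int)) (t : List Int) :
    (PySem.List.pyRange (d * k) (min (d * k + d) (poly.length : Int))).foldl (Af poly d) t
    = (PySem.List.enumerate (PySem.List.slice poly (some (d * k)) (some (d * k + d)))).foldl
        (fun t jc => t.set jc.1.toNat (t.getD jc.1.toNat 0 + (-1 : Int) ^ k * jc.2)) t := by
  set N : Int := (poly.length : Int) with hN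
  have hB0 : (0:Int) ≤ d * k := by positivity
  have hBd : (0:Int) ≤ d * k + d := by omega
  set e : Int := min (d * k + d) N with he
  have hLe : (e - d * k).toNat ≤ d.toNat := by omega
  set L : Nat := (e - d * k).toNat with hL
  -- the slice
  rw [PySem.List.slice_toNat poly hB0 hBd]
  set lst := (poly.drop (d * k).toNat).take ((d * k + d).toNat - (d * k).toNat) with hlst
  have hlen : lst.length = L := by
    simp [hlst, List.length_take, List.length_drop]
    omega
  -- RHS as fold over range L
  rw [PySem.List.enumerate_eq_map_pyRange lst 0]
  have hlenI : PySem.List.len lst = ((L : Nat) : Int) := by simp [hlen]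
  rw [hlenI, PySem.List.pyRange_one 0 ((L:Nat):Int), PySem.List.pyRange_one (d * k) e]
  have hLL : (((L:Nat):Int) - 0).toNat = L := by omega
  have hLL2 : (e - d * k).toNat = L := rfl
  rw [hLL, hLL2, List.foldl_map, List.foldl_map, List.foldl_map]
  apply PySem.List.foldl_congr_mem
  intro acc j hj
  have hjL : j < L := List.mem_range.mp hj
  have hjd : (j : Int) < d := by omega
  have hje : d * k + (j:Int) < N := by omega
  -- lst[j] = poly[(d*k).toNat + j]
  have hidx : (d * k).toNat + j < poly.length := by omega
  have hget : PySem.List.pyGetD lst (0 + (j:Int)) 0 = poly[(d * k).toNat + j]'hidx := by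
    rw [zero_add, PySem.List.pyGetD_eq_getElem lst 0 (by positivity) (by exact_mod_cast by omega)]
    simp [hlst, List.getElem_take, List.getElem_drop]
  rw [hget]
  -- Af at i = d*k + j
  show Af poly d acc (d * k + (j:Int)) = _
  unfold Af
  have hpow : PySem.Int.floordiv (d * k + (j:Int)) d = (k : Int) := by
    rw [PySem.Int.floordiv_eq_ediv_of_pos hd]
    rw [show d * (k:Int) + (j:Int) = (j:Int) + d * k by ring]
    rw [Int.add_mul_ediv_left _ _ (show d ≠ 0 by omega)]
    rw [Int.ediv_eq_zero_of_lt (by positivity) hjd]; ring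
  have hmod : PySem.Int.mod (d * k + (j:Int)) d = (j : Int) := by
    rw [PySem.Int.mod_eq_emod_of_pos hd]
    rw [show d * (k:Int) + (j:Int) = (j:Int) + d * k by ring]
    rw [Int.add_mul_emod_self_left]
    exact Int.emod_eq_of_lt (by positivity) hjd
  have hPg : PySem.List.pyGetD poly (d * k + (j:Int)) 0 = poly[(d * k).toNat + j]'hidx := by
    rw [PySem.List.pyGetD_eq_getElem poly 0 (by positivity) (by exact_mod_cast hje)]
    congr 1; omega
  rw [hpow, hmod, hPg]
  simp only [zero_add, Int.toNat_natCast]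
  by_cases hk1 : (k : Int) = 1
  · rw [if_pos hk1]
    have hk1' : k = 1 := by exact_mod_cast hk1
    subst hk1'; norm_num
  · rw [if_neg hk1]

lemma main_lemma (poly : List Int) (d : Int) (hd : 0 < d) :
    ∀ (m k : Nat) (t : List Int), 1 ≤ k → (poly.length : Int) ≤ d * k + d * m →
    (PySem.List.pyRange (d * k) (poly.length : Int)).foldl (Af poly d) t
    = ((PySem.List.pyRange (d * k) (poly.length : Int) d).foldl (Bg poly d) (t, (-1 : Int) ^ (k - 1))).1 := by
  intro m
  induction m with
  | zero =>
    intro k t hk hle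
    rw [PySem.List.pyRange_one_eq_nil (by omega), pyRange_step_nil _ _ _ hd (by omega)]
    rfl
  | succ m ih =>
    intro k t hk hle
    set N : Int := (poly.length : Int) with hN
    by_cases hlt : d * k < N
    · rw [pyRange_step_cons _ _ _ hd hlt]
      rw [List.foldl_cons]
      have hBg : Bg poly d (t, (-1 : Int) ^ (k - 1)) (d * k)
          = ((PySem.List.enumerate (PySem.List.slice poly (some (d * k)) (some (d * k + d)))).foldl
              (fun t jc => t.set jc.1.toNat (t.getD jc.1.toNat 0 + (-1 : Int) ^ k * jc.2)) t,
             (-1 : Int) ^ k) := by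
        unfold Bg
        rw [neg_pow_pred k hk]
      rw [hBg]
      set t' := (PySem.List.enumerate (PySem.List.slice poly (some (d * k)) (some (d * k + d)))).foldl
          (fun t jc => t.set jc.1.toNat (t.getD jc.1.toNat 0 + (-1 : Int) ^ k * jc.2)) t with ht'
      have hsplit : PySem.List.pyRange (d * k) N
          = PySem.List.pyRange (d * k) (min (d * k + d) N) ++ PySem.List.pyRange (min (d * k + d) N) N := by
        exact PySem.List.pyRange_one_append _ _ _ (by omega) (by omega)
      rw [hsplit, List.foldl_append, block_lemma poly d hd k hk hlt t, ← ht']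
      by_cases hend : N ≤ d * k + d
      · have h1 : min (d * k + d) N = N := by omega
        rw [h1, PySem.List.pyRange_one_eq_nil (le_refl N), pyRange_step_nil _ _ _ hd (by omega)]
        rfl
      · have h1 : min (d * k + d) N = d * k + d := by omega
        have h2 : d * k + d = d * ((k+1 : Nat) : Int) := by push_cast; ring
        rw [h1, h2]
        have harith : d * ((k + 1 : Nat) : Int) + d * (m : Nat) = d * (k : Nat) + d * ((m + 1 : Nat) : Int) := by
          push_cast; ring
        have := ih (k+1) t' (by omega) (by push_cast at harith hle ⊢; omega)
        rw [show ((k+1) - 1 : Nat) = k from rfl] at this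
        exact this
    · rw [PySem.List.pyRange_one_eq_nil (by omega), pyRange_step_nil _ _ _ hd (by omega)]
      rfl

-- ===== VERDICT (by name: the statement is the Claim_ definition above) =====
theorem mod_poly_spec : Claim_equal_mod_poly := by
  intro poly d _ hpre
  obtain ⟨hd, hdn⟩ := hpre
  unfold Spec_mod_poly
  have hA : mod_poly poly d = (PySem.List.pyRange d ((poly.length : Nat) : Int)).foldl (Af poly d)
      ((PySem.List.pyRange 0 d 1).map (fun x => PySem.List.pyGetD poly x 0)) := rfl
  have hB : mod_poly_alt poly d = ((PySem.List.pyRange d ((poly.length : Nat) : Int) d).foldl (Bg poly d)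
      (((PySem.List.pyRange 0 d 1).map (fun x => PySem.List.pyGetD poly x 0)), 1)).1 := rfl
  rw [hA, hB]
  have hm : ((poly.length : Nat) : Int) ≤ d * ((1 : Nat) : Int) + d * ((poly.length : Nat) : Int) := by
    push_cast
    nlinarith [hd, Int.natCast_nonneg poly.length]
  have key := main_lemma poly d hd poly.length 1
      ((PySem.List.pyRange 0 d 1).map (fun x => PySem.List.pyGetD poly x 0)) (le_refl 1) hm
  norm_num at key
  exact key
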